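-- pv_equiv track=rewrite | github.com/kittleik/intrusive-thoughts | select_mood.py | detect_spiral
-- ===== SOURCE A (Python) =====
-- from typing import Dict, List, Any, Optional, Tuple
--
-- def detect_spiral(mood_history: List[Dict[str, Any]]) -> Tuple[Optional[str], int]:
--     """Detect if we're in a mood spiral (same mood multiple days)"""
--     if len(mood_history) < 2:
--         return None, 0
--
--     # Check last few entries for consecutive same moods
--     recent_entries = mood_history[-5:]  # Last 5 days max
--     if not recent_entries:
--         return None, 0
--
--     current_mood = recent_entries[-1].get("mood")
--     if not current_mood:
--         return None, 0
--
--     consecutive_count = 1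
--     for entry in reversed(recent_entries[:-1]):
--         if entry.get("mood") == current_mood:
--             consecutive_count += 1
--         else:
--             break
--
--     if consecutive_count >= 2:
--         return current_mood, consecutive_count
--
--     return None, 0
-- ===== SOURCE B (Python) =====
-- from typing import Dict, List, Any, Optional, Tuple
--
-- def _runs(xs):
--     """Run-length encode xs left-to-right into (value, length) pairs."""
--     runs = []
--     for x in xs:
--         if runs and runs[-1][0] == x:
--             runs[-1] = (x, runs[-1][1] + 1)
--         else:
--             runs.append((x, 1))
--     return runs
--
-- def detect_spiral(mood_history: List[Dict[str, Any]]) -> Tuple[Optional[str], int]: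
--     if len(mood_history) < 2:
--         return None, 0
--     moods = [e.get("mood") for e in mood_history[-5:]]
--     if not moods:
--         return None, 0
--     current = moods[-1]
--     if not current:
--         return None, 0
--     count = _runs(moods)[-1][1]
--     return (current, count) if count >= 2 else (None, 0)
-- ===== Notes on version B (the rewrite author's own statement) =====
-- stated objective: alternative
-- what changed: B extracts the mood values of the 5-entry window once and run-length-encodes them left-to-right, reading the answer off the final run, instead of A's backward scan over the entries with an early break.
import Mathlib
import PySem

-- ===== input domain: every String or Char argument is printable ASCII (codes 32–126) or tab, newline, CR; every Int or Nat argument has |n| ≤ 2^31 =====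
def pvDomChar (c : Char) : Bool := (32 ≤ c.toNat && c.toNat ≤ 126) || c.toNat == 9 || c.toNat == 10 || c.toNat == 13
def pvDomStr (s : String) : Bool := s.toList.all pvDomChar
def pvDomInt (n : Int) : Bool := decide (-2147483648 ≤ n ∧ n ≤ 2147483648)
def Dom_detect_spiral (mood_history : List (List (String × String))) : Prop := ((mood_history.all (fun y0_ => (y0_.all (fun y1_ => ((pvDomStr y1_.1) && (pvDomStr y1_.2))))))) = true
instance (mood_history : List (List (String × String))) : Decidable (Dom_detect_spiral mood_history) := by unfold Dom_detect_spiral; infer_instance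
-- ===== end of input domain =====

-- B replaces A's backward early-break scan over the entries by a forward run-length
-- encoding of the window's mood values; same result, similar cost (objective: alternative).

-- ===== PORT A =====
-- dict.get("mood"): first-match lookup in the association list
def pvGetMood (e : List (String × String)) : Option String :=
  match e with
  | [] => none
  | (k, v) :: rest => if k == "mood" then some v else pvGetMood rest

-- the 'for entry in reversed(recent_entries[:-1]): … else: break' loop
def pvSpiralLoop (cur : Option String) : List (List (String × String)) → Int → Int
  | [], acc => acc
  | e :: rest, acc => if pvGetMood e == cur then pvSpiralLoop cur rest (acc + 1) else acc

def detect_spiral (mood_history : List (List (String × String))) : Option String × Int :=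
  if mood_history.length < 2 then (none, 0)
  else
    let recent := PySem.List.slice mood_history (some (-5)) none
    if recent = [] then (none, 0)
    else
      match (PySem.List.pyGet? recent (-1)).bind pvGetMood with
      | none => (none, 0)          -- current_mood is None: falsy
      | some m =>
        if m = "" then (none, 0)   -- current_mood is "": falsy
        else
          let cnt := pvSpiralLoop (some m) (PySem.List.slice recent none (some (-1))).reverse 1
          if cnt ≥ 2 then (some m, cnt) else (none, 0)

-- ===== PORT B =====
-- _runs: forward run-length encoding; 'runs[-1] = (x, n+1)' is dropLast ++ [(x, n+1)]
def pvRunsStep (runs : List (Option String × Int)) (x : Option String) :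
    List (Option String × Int) :=
  match runs.getLast? with
  | some (k, n) => if k == x then runs.dropLast ++ [(x, n + 1)] else runs ++ [(x, 1)]
  | none => [(x, 1)]

def pvRuns (xs : List (Option String)) : List (Option String × Int) :=
  xs.foldl pvRunsStep []

def detect_spiral_alt (mood_history : List (List (String × String))) : Option String × Int :=
  if mood_history.length < 2 then (none, 0)
  else
    let moods := (PySem.List.slice mood_history (some (-5)) none).map pvGetMood
    if moods = [] then (none, 0)
    else
      match PySem.List.pyGet? moods (-1) with
      | none => (none, 0)                -- unreachable: moods nonempty
      | some none => (none, 0)           -- current is None: falsy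
      | some (some m) =>
        if m = "" then (none, 0)         -- current is "": falsy
        else
          let count := match (pvRuns moods).getLast? with
                       | some (_, n) => n
                       | none => 0       -- unreachable: moods nonempty
          if count ≥ 2 then (some m, count) else (none, 0)

-- ===== PRECONDITION & SPEC =====
def Spec_detect_spiral (mood_history : List (List (String × String))) (out : Option String × Int) : Prop := out = detect_spiral_alt mood_history
instance (mood_history : List (List (String × String))) (out : Option String × Int) : Decidable (Spec_detect_spiral mood_history out) := by unfold Spec_detect_spiral; infer_instance

-- ===== CLAIM (what is proved, stated in full; the proofs are below) =====
def Claim_equal_detect_spiral : Prop := ∀ (mood_history : List (List (String × String))), Dom_detect_spiral mood_history → Spec_detect_spiral mood_history (detect_spiral mood_history)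

-- ===== LEMMAS AND PROOFS =====

-- number of trailing elements of l equal to c
def pvTrail (c : Option String) (l : List (Option String)) : Nat :=
  (l.reverse.takeWhile (fun x => x == c)).length

theorem pvTrail_append_self (c : Option String) (l : List (Option String)) :
    pvTrail c (l ++ [c]) = pvTrail c l + 1 := by
  simp [pvTrail, ]

theorem pvTrail_append_ne (c b : Option String) (l : List (Option String)) (h : ¬ b == c) :
    pvTrail c (l ++ [b]) = 0 := by
  simp [pvTrail, h]

-- A's loop counts the leading moods (of the reversed prefix) equal to cur
theorem pvSpiralLoop_counts (c : Option String) :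
    ∀ (es : List (List (String × String))) (acc : Int),
      pvSpiralLoop c es acc
        = acc + (((es.map pvGetMood).takeWhile (fun x => x == c)).length : Int) := by
  intro es
  induction es with
  | nil => intro acc; simp [pvSpiralLoop]
  | cons e es ih =>
    intro acc
    simp only [pvSpiralLoop, List.map_cons, ]
    by_cases hc : pvGetMood e == c
    · rw [if_pos hc, ih (acc + 1)]
      simp [hc]; omega
    · rw [if_neg hc]
      simp [hc]

-- B's run-length encoding: the final run of l ++ [c] is (c, 1 + trailing count of c in l)
theorem pvRuns_getLast (l : List (Option String)) (c : Option String) :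
    (pvRuns (l ++ [c])).getLast? = some (c, 1 + (pvTrail c l : Int)) := by
  induction l using List.reverseRecOn generalizing c with
  | nil => simp [pvRuns, pvRunsStep, pvTrail]
  | append_singleton l' b ih =>
    have hstep : pvRuns ((l' ++ [b]) ++ [c]) = pvRunsStep (pvRuns (l' ++ [b])) c := by
      simp [pvRuns]
    have hlast := ih b
    obtain ⟨rs, hrs⟩ : ∃ rs, pvRuns (l' ++ [b]) = rs ++ [(b, 1 + (pvTrail b l' : Int))] := by
      rcases List.getLast?_eq_some_iff.mp hlast with ⟨rs, h⟩
      exact ⟨rs, h⟩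
    rw [hstep, hrs]
    unfold pvRunsStep
    by_cases hbc : b == c
    · have hb : b = c := by simpa using hbc
      subst hb
      simp [pvTrail_append_self]
      ring_nf
    · simp [hbc, pvTrail_append_ne c b l' hbc]

theorem detect_spiral_spec : Claim_equal_detect_spiral := by
  intro mh _
  unfold Spec_detect_spiral detect_spiral detect_spiral_alt
  by_cases h2 : mh.length < 2
  · simp [h2]
  · simp only [h2, if_false]
    rcases eq_or_ne (PySem.List.slice mh (some (-5)) none) [] with hre | hre
    · simp [hre]
    · set recent := PySem.List.slice mh (some (-5)) none with hrec
      obtain ⟨front, e, hfe⟩ : ∃ front e, recent = front ++ [e] :=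
        ⟨recent.dropLast, recent.getLast hre, (List.dropLast_append_getLast hre).symm⟩
      have hget : PySem.List.pyGet? recent (-1) = some e := by
        rw [PySem.List.pyGet?_neg_one, hfe]
        simp
      have hmne : recent.map pvGetMood ≠ [] := by simp [hre]
      have hmget : PySem.List.pyGet? (recent.map pvGetMood) (-1) = some (pvGetMood e) := by
        rw [PySem.List.pyGet?_neg_one, hfe]
        simp
      simp only [hre, if_false, hmne, if_false, hget, hmget, Option.bind_some]
      cases hm : pvGetMood e with
      | none => simp
      | some m =>
        by_cases hms : m = ""
        · simp [hms]
        · simp only [hms, if_false]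
          have hA : pvSpiralLoop (some m)
              (PySem.List.slice recent none (some (-1))).reverse 1
              = 1 + (pvTrail (some m) ((recent.map pvGetMood).dropLast) : Int) := by
            rw [PySem.List.slice_to_neg_one, pvSpiralLoop_counts]
            congr 1
            simp [pvTrail, List.map_dropLast]
          have hmap : recent.map pvGetMood
              = (front.map pvGetMood) ++ [some m] := by
            rw [hfe]; simp [hm]
          have hB : (pvRuns (recent.map pvGetMood)).getLast?
              = some (some m, 1 + (pvTrail (some m) (front.map pvGetMood) : Int)) := by
            rw [hmap, pvRuns_getLast]
          have hdl : (recent.map pvGetMood).dropLast = front.map pvGetMood := by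
            rw [hmap]; simp
          rw [hA, hB, hdl]

-- ===== VERDICT (by name: the statement is the Claim_ definition above) =====
-- (the theorem above is the verdict)
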